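-- pv_equiv track=rewrite | github.com/crazym/CSCD27 | a1/rc4.py | create_key_schedule
-- ===== SOURCE A (Python) =====
-- def create_key_schedule(key):
-- 	s=[]
-- 	t=[]
-- 	for i in range(0,256):
-- 		s.append(i)
-- 		t.append(ord(key[i % len(str(key))]))
--
-- 	j=0
-- 	for i in range(0,256):
-- 		j = (j + s[i] + t[i]) % 256
-- 		s[i], s[j] = s[j], s[i]
-- 	return s
-- ===== SOURCE B (Python) =====
-- def create_key_schedule(key):
--     ks = str(key)
--     klen = len(ks)
--
--     def fill(d, i, j):
--         if i == 256:
--             return d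
--         j = (j + d[i] + ord(ks[i % klen])) % 256
--         d[i], d[j] = d[j], d[i]
--         return fill(d, i + 1, j)
--
--     d = fill({i: i for i in range(256)}, 0, 0)
--     return [d[i] for i in range(256)]
-- ===== Notes on version B (the rewrite author's own statement) =====
-- stated objective: alternative
-- what changed: B keeps the state as a dict of index->value updated by a recursive helper instead of A's two staged list-building loops with an auxiliary t table, and extracts the result list from the dict at the end.
import Mathlib
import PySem

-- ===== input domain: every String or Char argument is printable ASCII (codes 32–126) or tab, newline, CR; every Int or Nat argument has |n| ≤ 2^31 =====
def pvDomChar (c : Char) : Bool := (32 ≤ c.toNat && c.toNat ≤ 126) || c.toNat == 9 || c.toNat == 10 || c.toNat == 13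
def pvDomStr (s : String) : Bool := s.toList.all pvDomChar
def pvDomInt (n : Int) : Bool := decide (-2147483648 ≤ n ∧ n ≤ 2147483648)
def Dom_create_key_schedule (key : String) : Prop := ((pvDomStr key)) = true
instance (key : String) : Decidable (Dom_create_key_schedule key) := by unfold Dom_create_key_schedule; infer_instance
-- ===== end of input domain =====

-- B keeps the RC4 state as a dict index->value updated by a recursive helper (no auxiliary
-- t table, no staged list-building passes) and extracts the result list at the end.


-- ===== PORT A =====
-- ord(key[i % len(str(key))]): total pyGetD form — Pre_ guarantees the index is in range.
def create_key_schedule (key : String) : List Int :=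
  let st : List Int × List Int :=
    (PySem.List.pyRange 0 256 1).foldl
      (fun (st : List Int × List Int) i =>
        (st.1 ++ [i],
         st.2 ++ [((PySem.List.pyGetD key.toList
                      (PySem.Int.mod i (PySem.Str.len key)) ' ').toNat : Int)]))
      ([], [])
  let res : List Int × Int :=
    (PySem.List.pyRange 0 256 1).foldl
      (fun (p : List Int × Int) i =>
        let j := PySem.Int.mod (p.2 + PySem.List.pyGetD p.1 i 0 + PySem.List.pyGetD st.2 i 0) 256
        let a := PySem.List.pyGetD p.1 j 0
        let b := PySem.List.pyGetD p.1 i 0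
        (PySem.List.pySetD (PySem.List.pySetD p.1 i a) j b, j))
      (st.1, 0)
  res.1

-- ===== PORT B =====
-- the recursive helper fill(d, i, j); recursion on the remaining count 256 - i,
-- d[i] / d[j] are total getD lookups — keys 0..255 are always present.
def pvFill (ks : List Char) (klen : Int) :
    Nat → Int → PySem.Dict Int Int → Int → PySem.Dict Int Int
  | 0, _, d, _ => d
  | n + 1, i, d, j =>
      let j' := PySem.Int.mod
        (j + d.getD i 0 + ((PySem.List.pyGetD ks (PySem.Int.mod i klen) ' ').toNat : Int)) 256
      let a := d.getD j' 0
      let b := d.getD i 0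
      pvFill ks klen n (i + 1) ((d.insert i a).insert j' b) j'

def create_key_schedule_alt (key : String) : List Int :=
  let ks := key.toList
  let klen := PySem.Str.len key
  let d0 : PySem.Dict Int Int :=
    (PySem.List.pyRange 0 256 1).foldl (fun d i => d.insert i i) PySem.Dict.empty
  let d := pvFill ks klen 256 0 d0 0
  (PySem.List.pyRange 0 256 1).map (fun i => d.getD i 0)

-- ===== PRECONDITION & SPEC =====
-- Pre_ excludes only the empty key, on which both Pythons raise ZeroDivisionError.
def Pre_create_key_schedule (key : String) : Prop := key.toList ≠ []
instance (key : String) : Decidable (Pre_create_key_schedule key) := by unfold Pre_create_key_schedule; infer_instance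
def pvWitness_create_key_schedule : String := "k"

def Spec_create_key_schedule (key : String) (out : List Int) : Prop := out = create_key_schedule_alt key
instance (key : String) (out : List Int) : Decidable (Spec_create_key_schedule key out) := by unfold Spec_create_key_schedule; infer_instance

-- ===== CLAIM (what is proved, stated in full; the proofs are below) =====
def Claim_equal_create_key_schedule : Prop := ∀ (key : String), Dom_create_key_schedule key → Pre_create_key_schedule key → Spec_create_key_schedule key (create_key_schedule key)

-- ===== LEMMAS AND PROOFS =====

-- the swap step of A's second loop, with the key byte computed directly
def pvStepA (ks : List Char) (klen : Int) (p : List Int × Int) (i : Int) : List Int × Int :=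
  let j := PySem.Int.mod
    (p.2 + PySem.List.pyGetD p.1 i 0 + ((PySem.List.pyGetD ks (PySem.Int.mod i klen) ' ').toNat : Int)) 256
  let a := PySem.List.pyGetD p.1 j 0
  let b := PySem.List.pyGetD p.1 i 0
  (PySem.List.pySetD (PySem.List.pySetD p.1 i a) j b, j)

lemma pvA_eq (key : String) :
    create_key_schedule key =
      ((PySem.List.pyRange 0 256 1).foldl
        (pvStepA key.toList (PySem.Str.len key))
        (PySem.List.pyRange 0 256 1, 0)).1 := by
  unfold create_key_schedule
  simp only []
  rw [PySem.List.foldl_prod_mk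
    (f := fun (acc : List Int) (i : Int) => acc ++ [i])
    (g := fun (acc : List Int) (i : Int) =>
      acc ++ [((PySem.List.pyGetD key.toList (PySem.Int.mod i (PySem.Str.len key)) ' ').toNat : Int)])]
  rw [PySem.List.foldl_append_singleton_eq_self,
    PySem.List.foldl_append_singleton_eq_map, List.nil_append, List.nil_append]
  apply congrArg
  apply PySem.List.foldl_congr_mem
  intro acc i hi
  rw [PySem.List.mem_pyRange_one] at hi
  show _ = pvStepA key.toList (PySem.Str.len key) acc i
  unfold pvStepA
  rw [PySem.List.pyGetD_map_pyRange_of_nonneg _ _ _ _ hi.1 hi.2]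

lemma pvGetSet (s : List Int) (i k v : Int)
    (hi0 : 0 ≤ i) (hk0 : 0 ≤ k) (hk : k < (s.length : Int)) :
    PySem.List.pyGetD (PySem.List.pySetD s i v) k 0 =
      if k = i then v else PySem.List.pyGetD s k 0 := by
  rw [PySem.List.pySetD_of_nonneg s v hi0]
  rw [PySem.List.pyGetD_eq_getElem _ _ hk0 (by simpa using hk),
      PySem.List.pyGetD_eq_getElem _ _ hk0 (by simpa using hk)]
  rw [List.getElem_set]
  by_cases h : k = i
  · simp [h]
  · have : i.toNat ≠ k.toNat := by omega
    simp [h, this]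

lemma pvFill_rel (ks : List Char) (klen : Int) :
    ∀ (n : Nat) (i j : Int) (s : List Int) (d : PySem.Dict Int Int),
      i = 256 - (n : Int) → (n : Int) ≤ 256 → s.length = 256 →
      (∀ k : Int, 0 ≤ k → k < 256 → d.getD k 0 = PySem.List.pyGetD s k 0) →
      (∀ k : Int, 0 ≤ k → k < 256 →
        (pvFill ks klen n i d j).getD k 0 =
          PySem.List.pyGetD (((PySem.List.pyRange i 256 1).foldl (pvStepA ks klen) (s, j)).1) k 0)
      ∧ (((PySem.List.pyRange i 256 1).foldl (pvStepA ks klen) (s, j)).1).length = 256 := by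
  intro n
  induction n with
  | zero =>
    intro i j s d hi _ hlen hrel
    have hr : PySem.List.pyRange i 256 1 = [] := by
      subst hi; decide
    rw [hr]
    exact ⟨fun k h0 h1 => by simpa [pvFill] using hrel k h0 h1, hlen⟩
  | succ n ih =>
    intro i j s d hi hn hlen hrel
    have hi0 : 0 ≤ i := by push_cast at hi hn ⊢; omega
    have hilt : i < 256 := by push_cast at hi hn ⊢; omega
    rw [PySem.List.pyRange_one_cons hilt, List.foldl_cons]
    set j1 := PySem.Int.mod
      (j + PySem.List.pyGetD s i 0 + ((PySem.List.pyGetD ks (PySem.Int.mod i klen) ' ').toNat : Int)) 256 with hj1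
    have hj10 : 0 ≤ j1 := PySem.Int.mod_nonneg _ (by norm_num)
    have hj1lt : j1 < 256 := PySem.Int.mod_lt _ (by norm_num)
    have hdij : d.getD i 0 = PySem.List.pyGetD s i 0 := hrel i hi0 hilt
    have hdj : d.getD j1 0 = PySem.List.pyGetD s j1 0 := hrel j1 hj10 hj1lt
    have hstep : pvStepA ks klen (s, j) i =
        (PySem.List.pySetD (PySem.List.pySetD s i (PySem.List.pyGetD s j1 0)) j1
          (PySem.List.pyGetD s i 0), j1) := rfl
    have hfill : pvFill ks klen (n + 1) i d j =
        pvFill ks klen n (i + 1)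
          ((d.insert i (d.getD j1 0)).insert j1 (d.getD i 0)) j1 := by
      simp only [pvFill, hdij, hj1]
    rw [hstep, hfill]
    apply ih
    · push_cast at hi ⊢; omega
    · push_cast at hn ⊢; omega
    · rw [PySem.List.length_pySetD, PySem.List.length_pySetD]; exact hlen
    · intro k hk0 hk1
      rw [PySem.Dict.getD_insert, PySem.Dict.getD_insert]
      rw [pvGetSet _ _ _ _ hj10 hk0 (by rw [PySem.List.length_pySetD]; omega)]
      rw [pvGetSet _ _ _ _ hi0 hk0 (by omega)]
      split_ifs with h1 h2
      · exact hdij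
      · exact hdj
      · exact hrel k hk0 hk1

lemma pvD0 : ∀ (l : List Int) (d : PySem.Dict Int Int) (k : Int),
    (l.foldl (fun d i => d.insert i i) d).getD k 0 = if k ∈ l then k else d.getD k 0 := by
  intro l
  induction l with
  | nil => intro d k; simp
  | cons x t ih =>
    intro d k
    rw [List.foldl_cons, ih, PySem.Dict.getD_insert]
    by_cases h1 : k ∈ t <;> by_cases h2 : k = x <;> simp [h1, h2]

lemma pvLenRange : (PySem.List.pyRange 0 256 1).length = 256 := by
  have h := PySem.List.pyRange_zero_natCast 256
  norm_num at h
  rw [h]; simp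

lemma pvGetRange (k : Int) (h0 : 0 ≤ k) (h1 : k < 256) :
    PySem.List.pyGetD (PySem.List.pyRange 0 256 1) k 0 = k := by
  have h : PySem.List.pyRange 0 256 1 = (PySem.List.pyRange 0 256 1).map (fun x => x) := by simp
  rw [h, PySem.List.pyGetD_map_pyRange_of_nonneg _ _ _ _ h0 h1]

-- ===== VERDICT (by name: the statement is the Claim_ definition above) =====
theorem create_key_schedule_spec : Claim_equal_create_key_schedule := by
  intro key _ _
  show create_key_schedule key = create_key_schedule_alt key
  rw [pvA_eq]
  unfold create_key_schedule_alt
  simp only []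
  have hrel0 : ∀ k : Int, 0 ≤ k → k < 256 →
      ((PySem.List.pyRange 0 256 1).foldl (fun d i => d.insert i i)
        PySem.Dict.empty).getD k 0 = PySem.List.pyGetD (PySem.List.pyRange 0 256 1) k 0 := by
    intro k h0 h1
    rw [pvD0, pvGetRange k h0 h1]
    simp [PySem.List.mem_pyRange_one, h0, h1]
  obtain ⟨hrel, hlen⟩ := pvFill_rel key.toList (PySem.Str.len key) 256 0 0
    (PySem.List.pyRange 0 256 1)
    ((PySem.List.pyRange 0 256 1).foldl (fun d i => d.insert i i) PySem.Dict.empty)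
    (by norm_num) (by norm_num) pvLenRange hrel0
  have hmap : (PySem.List.pyRange 0 256 1).map
      (fun i => (pvFill key.toList (PySem.Str.len key) 256 0
        ((PySem.List.pyRange 0 256 1).foldl (fun d i => d.insert i i) PySem.Dict.empty) 0).getD i 0)
      = (PySem.List.pyRange 0 256 1).map
      (fun i => PySem.List.pyGetD
        (((PySem.List.pyRange 0 256 1).foldl (pvStepA key.toList (PySem.Str.len key))
          (PySem.List.pyRange 0 256 1, 0)).1) i 0) := by
    apply List.map_congr_left
    intro i hi
    rw [PySem.List.mem_pyRange_one] at hi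
    exact hrel i hi.1 hi.2
  rw [hmap]
  have hx := PySem.List.map_pyGetD_pyRange_zero'
    (((PySem.List.pyRange 0 256 1).foldl (pvStepA key.toList (PySem.Str.len key))
      (PySem.List.pyRange 0 256 1, 0)).1) (0 : Int)
  rw [hlen] at hx
  norm_num at hx
  exact hx.symm
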